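-- pv_equiv track=rewrite | github.com/miliar/Code_Jam_Webscraper | solutions_python/solutions_year16_round0_nr3/2024.py | find_coinjam_divisors
-- ===== SOURCE A (Python) =====
-- def find_coinjam_divisors(jam):
--     bases = [base for base in range(2, 11)]
--     divisors = []
--     for base in bases:
--         divisor = find_divisor(number_as_base(int(jam), base))
--         if divisor == 0:
--             return []
--         else:
--             divisors.append(divisor)
--     return divisors
--
-- def number_as_base(num, base):
--     value = 0
--     place = 0
--     while num:
--         value += (int(num % 10) * (int(base) ** place))
--         num //= 10
--         place += 1
--     return value
--
-- def find_divisor(num):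
--     i = 2
--     while i * i <= num:
--         if num % i != 0:
--             i += 1
--             # Don't waste time with the ones that take forever, more fish in the sea
--             if i > 1000:
--                 break
--         else:
--             return i
--     return 0
-- ===== SOURCE B (Python) =====
-- def find_coinjam_divisors(jam):
--     n = int(jam)
--     digits = _digits(n)
--     # one simultaneous pass: update all nine base values per decimal digit
--     values = [0] * 9
--     for d in digits:
--         values = [values[b] * (b + 2) + d for b in range(9)]
--     primes = _primes_upto(1000)
--     divs = [next((p for p in primes if p * p <= v and v % p == 0), 0) for v in values]
--     return [] if 0 in divs else divs
--
-- def _digits(n):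
--     return _digits(n // 10) + [n % 10] if n else []
--
-- def _primes_upto(limit):
--     # sieve by repeated filtering: keep the head, drop its multiples, recurse
--     return _sieve(list(range(2, limit + 1)))
--
-- def _sieve(candidates):
--     if not candidates:
--         return []
--     p = candidates[0]
--     return [p] + _sieve([c for c in candidates[1:] if c % p != 0])
-- ===== Notes on version B (the rewrite author's own statement) =====
-- stated objective: alternative
-- what changed: B precomputes the primes up to 1000 with a sieve of Eratosthenes and finds each small divisor as the first sieved prime p with p*p <= v dividing v (correct because the smallest divisor >= 2 of any number is prime), extracts the decimal digits once by recursion, and evaluates all nine bases in ONE simultaneous pass over the digits (a vector of nine running values), replacing A's per-base place-power accumulation and per-base incremental trial division over all integers 2..1000.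
import Mathlib
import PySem

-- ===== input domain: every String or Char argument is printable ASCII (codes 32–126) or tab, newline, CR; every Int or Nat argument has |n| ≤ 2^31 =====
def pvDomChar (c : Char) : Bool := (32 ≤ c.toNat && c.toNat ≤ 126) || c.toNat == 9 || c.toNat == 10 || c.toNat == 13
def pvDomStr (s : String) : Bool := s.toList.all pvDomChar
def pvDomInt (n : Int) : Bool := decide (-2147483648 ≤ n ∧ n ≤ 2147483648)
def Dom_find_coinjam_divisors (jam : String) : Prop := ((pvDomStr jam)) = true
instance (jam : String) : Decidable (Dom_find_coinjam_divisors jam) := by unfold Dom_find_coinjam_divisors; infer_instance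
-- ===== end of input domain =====

set_option maxRecDepth 100000
set_option maxHeartbeats 2000000


-- B sieves the primes up to 1000 once and takes the first prime p with p*p ≤ v dividing v,
-- extracts the decimal digits once recursively, and evaluates all nine bases in a single
-- simultaneous pass over the digits; same return value as A on Pre_.

-- ===== PORT A =====
-- while num: value += num%10 * base**place; num //= 10; place += 1
-- (fuel bounds the loop; it is never exhausted for num ≥ 0, the only case Pre_ admits)
def pvNabGo : Nat → Int → Int → Int → Nat → Int
  | 0, _, _, value, _ => value
  | fuel+1, num, base, value, place =>
    if num ≠ 0 then
      pvNabGo fuel (PySem.Int.floordiv num 10) base (value + PySem.Int.mod num 10 * base ^ place) (place + 1)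
    else value

def number_as_base (num base : Int) : Int := pvNabGo (num.toNat + 1) num base 0 0

-- i = 2; while i*i <= num: … ; i never exceeds 1001 (break at i > 1000), so fuel 999 suffices
def pvFdGo : Nat → Int → Int → Int
  | 0, _, _ => 0
  | fuel+1, num, i =>
    if i * i ≤ num then
      if PySem.Int.mod num i ≠ 0 then
        if i + 1 > 1000 then 0 else pvFdGo fuel num (i + 1)
      else i
    else 0

def find_divisor (num : Int) : Int := pvFdGo 999 num 2

def pvFcjGo : List Int → Int → List Int → List Int
  | [], _, divisors => divisors
  | base :: rest, n, divisors =>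
    let divisor := find_divisor (number_as_base n base)
    if divisor = 0 then [] else pvFcjGo rest n (divisors ++ [divisor])

def find_coinjam_divisors (jam : String) : List Int :=
  match PySem.Int.ofStr? jam with
  | none => []   -- int(jam) raises ValueError: excluded by Pre_
  | some n => pvFcjGo (PySem.List.pyRange 2 11 1) n []

-- ===== PORT B =====
-- _digits(n) = _digits(n // 10) + [n % 10] if n else []
-- (fuel bounds the recursion; never exhausted for n ≥ 0, the only case Pre_ admits)
def pvDigits : Nat → Int → List Int
  | 0, _ => []
  | fuel+1, n =>
    if n ≠ 0 then pvDigits fuel (PySem.Int.floordiv n 10) ++ [PySem.Int.mod n 10] else []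

-- _sieve: keep the head, filter out its multiples, recurse
-- (fuel bounds the recursion; 999 ≥ the candidate count, so it is never exhausted)
def pvSieveGo : Nat → List Int → List Int
  | 0, _ => []
  | _+1, [] => []
  | fuel+1, p :: rest =>
    p :: pvSieveGo fuel (rest.filter (fun c => !(PySem.Int.mod c p == 0)))
-- _primes_upto(1000) = _sieve(list(range(2, 1001)))
def pvPrimes : List Int := pvSieveGo 999 (PySem.List.pyRange 2 1001 1)

-- values = [values[b] * (b + 2) + d for b in range(9)]
def pvStep (values : List Int) (d : Int) : List Int :=
  (PySem.List.pyRange 0 9 1).map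
    (fun b => (PySem.List.pyGet? values b).getD 0 * (b + 2) + d)

-- next((p for p in primes if p * p <= v and v % p == 0), 0)
def pvFirstPrime (v : Int) : Int :=
  ((pvPrimes.find? (fun p => decide (p * p ≤ v) && (PySem.Int.mod v p == 0))).getD 0)

def find_coinjam_divisors_alt (jam : String) : List Int :=
  match PySem.Int.ofStr? jam with
  | none => []   -- int(jam) raises ValueError: excluded by Pre_
  | some n =>
    let digits := pvDigits (n.toNat + 1) n
    let values := digits.foldl pvStep (List.replicate 9 0)
    let divs := values.map pvFirstPrime
    if divs.contains 0 then [] else divs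

-- ===== PRECONDITION & SPEC =====
-- Pre_ admits exactly the inputs on which A returns: jam must parse as a Python int
-- (otherwise int(jam) raises ValueError) and the value must be nonnegative (on a negative
-- value A's digit loop never terminates, since floor-dividing -1 by 10 yields -1 again).
def Pre_find_coinjam_divisors (jam : String) : Prop :=
  0 ≤ (PySem.Int.ofStr? jam).getD (-1)
instance (jam : String) : Decidable (Pre_find_coinjam_divisors jam) := by
  unfold Pre_find_coinjam_divisors; infer_instance

def pvWitness_find_coinjam_divisors : String := "2024"

def Spec_find_coinjam_divisors (jam : String) (out : List Int) : Prop :=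
  out = find_coinjam_divisors_alt jam
instance (jam : String) (out : List Int) : Decidable (Spec_find_coinjam_divisors jam out) := by
  unfold Spec_find_coinjam_divisors; infer_instance

-- ===== CLAIM (what is proved, stated in full; the proofs are below) =====
def Claim_equal_find_coinjam_divisors : Prop :=
  ∀ (jam : String), Dom_find_coinjam_divisors jam → Pre_find_coinjam_divisors jam →
    Spec_find_coinjam_divisors jam (find_coinjam_divisors jam)

-- ===== LEMMAS AND PROOFS =====

def pvHorner (digits : List Int) (base : Int) : Int :=
  digits.foldl (fun v d => v * base + d) 0

theorem pvHorner_append (xs : List Int) (d base : Int) :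
    pvHorner (xs ++ [d]) base = pvHorner xs base * base + d := by
  simp [pvHorner, List.foldl_append]

-- A's place-power accumulation equals the Horner value of B's digit list
theorem pvNab_eq_horner (fuel : Nat) : ∀ (n base v : Int) (p : Nat),
    0 ≤ n → n.toNat ≤ fuel →
    pvNabGo fuel n base v p = v + pvHorner (pvDigits fuel n) base * base ^ p := by
  induction fuel with
  | zero =>
    intro n base v p h0 hf
    have hz : n = 0 := by omega
    subst hz
    simp [pvNabGo, pvDigits, pvHorner]
  | succ fuel ih =>
    intro n base v p h0 hf
    by_cases h : n = 0
    · simp [h, pvNabGo, pvDigits, pvHorner]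
    · have hpos : 0 < n := by omega
      have hfd : PySem.Int.floordiv n 10 = n / 10 :=
        PySem.Int.floordiv_eq_ediv_of_pos (by norm_num)
      have h1 : 0 ≤ n / 10 := by omega
      have h2 : (n / 10).toNat ≤ fuel := by omega
      simp only [pvNabGo, pvDigits, if_pos h]
      rw [hfd, ih (n / 10) base _ (p + 1) h1 h2, pvHorner_append]
      ring

-- A's trial division loop is the first match over the integer range 2..1000
theorem pvFd_eq_range_find (num : Int) : ∀ (fuel : Nat) (i : Int),
    2 ≤ i → i + fuel = 1001 →
    pvFdGo fuel num i =
      (((PySem.List.pyRange i 1001 1).find?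
          (fun j => decide (j * j ≤ num) && (PySem.Int.mod num j == 0))).getD 0) := by
  intro fuel
  induction fuel with
  | zero =>
    intro i h2 h1001
    rw [PySem.List.pyRange_one_eq_nil (by omega : (1001 : Int) ≤ i)]
    simp [pvFdGo]
  | succ fuel ih =>
    intro i h2 h1001
    rw [PySem.List.pyRange_one_cons (by omega : i < 1001), List.find?_cons]
    by_cases hle : i * i ≤ num
    · by_cases hm : PySem.Int.mod num i = 0
      · simp [pvFdGo, hle, hm]
      · have hpred : (decide (i * i ≤ num) && (PySem.Int.mod num i == 0)) = false := by
          simp [hm]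
        rw [hpred]
        by_cases hbig : i + 1 > 1000
        · have hi : i = 1000 := by omega
          subst hi
          rw [PySem.List.pyRange_one_eq_nil (by norm_num : (1001 : Int) ≤ 1000 + 1)]
          simp only [pvFdGo, List.find?_nil, Option.getD_none]
          rw [if_pos hle, if_pos hm, if_pos hbig]
        · simp only [pvFdGo, if_pos hle, if_neg hbig, ne_eq, hm, not_false_iff, if_true]
          exact ih (i + 1) (by omega) (by omega)
    · have hnone : (PySem.List.pyRange (i + 1) 1001 1).find?
          (fun j => decide (j * j ≤ num) && (PySem.Int.mod num j == 0)) = none := by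
        apply List.find?_eq_none.mpr
        intro j hj
        have hji : i + 1 ≤ j := (PySem.List.mem_pyRange_one.mp hj).1
        have : ¬ j * j ≤ num := by
          intro hc
          exact hle (le_trans (mul_le_mul (by omega) (by omega) (by omega) (by omega)) hc)
        simp [this]
      have hpred : (decide (i * i ≤ num) && (PySem.Int.mod num i == 0)) = false := by
        simp [hle]
      rw [hpred, hnone]
      simp [pvFdGo, hle]

-- B's sieve output is exactly the integers 2..1000 with no divisor in [2, 32) other than themselves
def pvNoSmallFactor (i : Int) : Bool :=
  (PySem.List.pyRange 2 32 1).all (fun e => (e == i) || !(PySem.Int.mod i e == 0))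

theorem pvPrimes_eq_filter :
    pvPrimes = (PySem.List.pyRange 2 1001 1).filter pvNoSmallFactor := by
  decide

-- filtering cannot change find? when the first match survives the filter
theorem pvFind_filter (R : List Int) (P q : Int → Bool)
    (h : ∀ x, R.find? P = some x → q x = true) :
    (R.filter q).find? P = R.find? P := by
  induction R with
  | nil => rfl
  | cons a rest ih =>
    by_cases hPa : P a = true
    · have hqa : q a = true := h a (by simp [hPa])
      simp [hqa, hPa]
    · have hPa' : P a = false := by simp at hPa; simp [hPa]
      have hrest : ∀ x, rest.find? P = some x → q x = true := by
        intro x hx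
        exact h x (by simp [hPa', hx])
      by_cases hqa : q a = true
      · simp [hqa, hPa', ih hrest]
      · have : q a = false := by simp at hqa; simp [hqa]
        simp [this, hPa', ih hrest]

-- elements before the first match of find? over a unit-step range all fail the predicate
theorem pvRange_find_first (P : Int → Bool) : ∀ (k : Nat) (a d : Int),
    (PySem.List.pyRange a (a + k) 1).find? P = some d →
    ∀ e, a ≤ e → e < d → P e = false := by
  intro k
  induction k with
  | zero =>
    intro a d hfind
    have hz : a + ((0:ℕ):Int) = a := by push_cast; ring
    rw [hz, PySem.List.pyRange_one_eq_nil le_rfl] at hfind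
    simp at hfind
  | succ k ih =>
    intro a d hfind e hae hed
    rw [PySem.List.pyRange_one_cons (by push_cast; omega : a < a + ((k+1:ℕ):Int)),
        List.find?_cons] at hfind
    by_cases hPa : P a = true
    · simp only [hPa] at hfind
      have : a = d := by simpa using hfind
      omega
    · have hPa' : P a = false := by simp at hPa; simp [hPa]
      simp only [hPa'] at hfind
      have heq : a + ((k + 1 : Nat) : Int) = (a + 1) + (k : Int) := by push_cast; ring
      rw [heq] at hfind
      by_cases hea : e = a
      · subst hea; exact hPa'
      · exact ih (a + 1) d hfind e (by omega) hed

-- the first i in 2..1000 with i*i ≤ num and i ∣ num has no proper factor: the smallest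
-- proper factor e would itself satisfy the predicate earlier in the range
theorem pvFirst_match_noSmallFactor (num d : Int)
    (h : (PySem.List.pyRange 2 1001 1).find?
        (fun j => decide (j * j ≤ num) && (PySem.Int.mod num j == 0)) = some d) :
    pvNoSmallFactor d = true := by
  set P : Int → Bool := fun j => decide (j * j ≤ num) && (PySem.Int.mod num j == 0) with hP
  have hPd : P d = true := List.find?_some h
  have hmem : d ∈ PySem.List.pyRange 2 1001 1 := List.mem_of_find?_eq_some h
  have hd2 : 2 ≤ d := (PySem.List.mem_pyRange_one.mp hmem).1
  have hfirst : ∀ e, 2 ≤ e → e < d → P e = false := by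
    have h' : (PySem.List.pyRange 2 (2 + (999:ℕ)) 1).find? P = some d := by
      norm_num; exact h
    exact pvRange_find_first P 999 2 d h'
  unfold pvNoSmallFactor
  rw [List.all_eq_true]
  intro e hemem
  obtain ⟨he2, he32⟩ := PySem.List.mem_pyRange_one.mp hemem
  by_cases hed : e = d
  · simp [hed]
  by_cases hdvd : PySem.Int.mod d e = 0
  · -- e divides d: show e satisfies P, contradicting that d is the first match
    exfalso
    have hdvd' : e ∣ d := (PySem.Int.mod_eq_zero_iff_dvd d e).mp hdvd
    have hel : e ≤ d := Int.le_of_dvd (by omega) hdvd'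
    have held : e < d := by omega
    have hPe : P e = true := by
      have hdnum : d ∣ num := by
        have : (PySem.Int.mod num d == 0) = true := by
          have := hPd; rw [hP] at this; simp at this; simp [this.2]
        exact (PySem.Int.mod_eq_zero_iff_dvd num d).mp (by simpa using this)
      have henum : e ∣ num := dvd_trans hdvd' hdnum
      have hsq : e * e ≤ num := by
        have hdd : d * d ≤ num := by
          have := hPd; rw [hP] at this; simp at this; exact this.1
        nlinarith
      rw [hP]
      simp [hsq, (PySem.Int.mod_eq_zero_iff_dvd num e).mpr henum]
    rw [hfirst e he2 held] at hPe
    exact absurd hPe (by simp)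
  · simp [hdvd]

-- hence A's trial division equals B's scan over the sieved primes
theorem find_divisor_eq (num : Int) : find_divisor num = pvFirstPrime num := by
  unfold find_divisor pvFirstPrime
  rw [pvFd_eq_range_find num 999 2 (by norm_num) (by norm_num), pvPrimes_eq_filter]
  rw [pvFind_filter _ _ pvNoSmallFactor (fun x hx => pvFirst_match_noSmallFactor num x hx)]

-- one step of the simultaneous pass updates every base's running value
theorem pvStep_map (f : Int → Int) (d : Int) :
    pvStep ((PySem.List.pyRange 2 11 1).map f) d =
      (PySem.List.pyRange 2 11 1).map (fun b => f b * b + d) := by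
  have h211 : PySem.List.pyRange 2 11 1 = [2, 3, 4, 5, 6, 7, 8, 9, 10] := by decide
  have h09 : PySem.List.pyRange 0 9 1 = [0, 1, 2, 3, 4, 5, 6, 7, 8] := by decide
  simp [pvStep, h211, h09, PySem.List.pyGet?, PySem.List.pyIdx?]

-- the simultaneous fold computes all nine Horner values
theorem pvFold_map (digits : List Int) : ∀ (f : Int → Int),
    digits.foldl pvStep ((PySem.List.pyRange 2 11 1).map f) =
      (PySem.List.pyRange 2 11 1).map
        (fun b => digits.foldl (fun v d => v * b + d) (f b)) := by
  induction digits with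
  | nil => intro f; simp
  | cons d rest ih =>
    intro f
    simp only [List.foldl_cons, pvStep_map f d, ih (fun b => f b * b + d)]

theorem pvValues_eq_horner (digits : List Int) :
    digits.foldl pvStep (List.replicate 9 0) =
      (PySem.List.pyRange 2 11 1).map (pvHorner digits) := by
  have hinit : (List.replicate 9 (0:Int)) =
      (PySem.List.pyRange 2 11 1).map (fun _ => (0:Int)) := by decide
  rw [hinit, pvFold_map digits (fun _ => 0)]
  rfl

-- A's outer early-return loop equals map-then-test-for-0
theorem pvFcjGo_eq (n : Int) (f : Int → Int)
    (hf : ∀ base, find_divisor (number_as_base n base) = f base) :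
    ∀ (bases : List Int) (acc : List Int),
      pvFcjGo bases n acc = if (bases.map f).contains 0 then [] else acc ++ bases.map f := by
  intro bases
  induction bases with
  | nil => intro acc; simp [pvFcjGo]
  | cons base rest ih =>
    intro acc
    simp only [pvFcjGo, hf base, List.map_cons, List.contains_cons]
    by_cases h : f base = 0
    · simp [h]
    · have hb : (0 == f base) = false := beq_eq_false_iff_ne.mpr (Ne.symm h)
      rw [if_neg h, ih]
      simp only [hb, Bool.false_or]
      split_ifs
      · rfl
      · simp

-- ===== VERDICT (by name: the statement is the Claim_ definition above) =====
theorem find_coinjam_divisors_spec : Claim_equal_find_coinjam_divisors := by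
  intro jam _ hpre
  unfold Spec_find_coinjam_divisors
  unfold Pre_find_coinjam_divisors at hpre
  unfold find_coinjam_divisors find_coinjam_divisors_alt
  cases hstr : PySem.Int.ofStr? jam with
  | none => simp [hstr] at hpre
  | some n =>
    simp only [hstr, Option.getD_some] at hpre
    simp only
    have hf : ∀ base, find_divisor (number_as_base n base) =
        pvFirstPrime (pvHorner (pvDigits (n.toNat + 1) n) base) := by
      intro base
      rw [find_divisor_eq]
      congr 1
      unfold number_as_base
      rw [pvNab_eq_horner (n.toNat + 1) n base 0 0 hpre (by omega)]
      ring
    rw [pvFcjGo_eq n _ hf, pvValues_eq_horner]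
    simp only [List.map_map, Function.comp_def, List.nil_append]
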